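-- pv_equiv track=rewrite | github.com/mykolamayorov/goit-cs-hw-05 | task2/main.py | map_reduce
-- ===== SOURCE A (Python) =====
-- import string
-- from collections import defaultdict
-- from concurrent.futures import ThreadPoolExecutor
--
-- def remove_punctuation(text):
--     return text.translate(str.maketrans("", "", string.punctuation))
--
-- def map_function(word):
--     return word.lower(), 1
--
-- def shuffle_function(mapped_values):
--     shuffled = defaultdict(list)
--     for key, value in mapped_values:
--         shuffled[key].append(value)
--     return shuffled.items()
--
-- def reduce_function(key_values):
--     key, values = key_values
--     return key, sum(values)
--
-- def map_reduce(text, search_words=None):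
--     text = remove_punctuation(text)
--     words = text.split()
--
--     # Optionally filter words
--     if search_words:
--         words = [word for word in words if word in search_words]
--
--     # --- Map step (parallel) ---
--     with ThreadPoolExecutor() as executor:
--         mapped_values = list(executor.map(map_function, words))
--
--     # --- Shuffle step ---
--     shuffled_values = shuffle_function(mapped_values)
--
--     # --- Reduce step (parallel) ---
--     with ThreadPoolExecutor() as executor:
--         reduced_values = list(executor.map(reduce_function, shuffled_values))
--
--     return dict(reduced_values)
-- ===== SOURCE B (Python) =====
-- import string
-- from collections import Counter
--
-- def map_reduce(text, search_words=None):
--     words = text.translate(str.maketrans("", "", string.punctuation)).split()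
--     if search_words:
--         words = [w for w in words if w in search_words]
--     return dict(Counter(w.lower() for w in words))
-- ===== Notes on version B (the rewrite author's own statement) =====
-- stated objective: simpler
-- what changed: Replaces the three-phase map/shuffle/reduce pipeline (thread pools, defaultdict of 1-lists, per-key sums) with a single pass: one Counter over the lowercased surviving words.
import Mathlib
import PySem

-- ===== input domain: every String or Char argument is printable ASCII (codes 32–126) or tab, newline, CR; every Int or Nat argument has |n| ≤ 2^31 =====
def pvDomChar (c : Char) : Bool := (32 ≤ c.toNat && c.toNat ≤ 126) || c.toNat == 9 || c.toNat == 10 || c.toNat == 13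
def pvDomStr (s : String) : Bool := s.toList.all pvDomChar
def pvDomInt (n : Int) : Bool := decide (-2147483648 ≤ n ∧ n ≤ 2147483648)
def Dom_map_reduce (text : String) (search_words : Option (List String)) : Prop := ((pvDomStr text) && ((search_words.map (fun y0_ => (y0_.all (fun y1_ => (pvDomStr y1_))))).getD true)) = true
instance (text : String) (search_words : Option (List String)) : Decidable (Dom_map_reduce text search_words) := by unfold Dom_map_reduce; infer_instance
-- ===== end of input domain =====

-- B replaces A's map/shuffle/reduce pipeline with one counting pass (a Counter); return values proved equal.

-- ===== PORT A =====
-- string.punctuation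
def pyPunctuation : List Char := "!\"#$%&'()*+,-./:;<=>?@[\\]^_`{|}~".toList

-- text.translate(str.maketrans("", "", string.punctuation)): delete-only translate = filter out those chars (exact)
def removePunctuation (text : String) : String :=
  String.mk (text.toList.filter (fun c => !(pyPunctuation.contains c)))

def mapFunction (word : String) : String × Int := (PySem.Str.lower word, 1)

def shuffleFunction (mapped_values : List (String × Int)) : List (String × List Int) :=
  (mapped_values.foldl (fun d p => d.modify p.1 [] (fun vs => vs ++ [p.2])) PySem.Dict.empty).items

def reduceFunction (key_values : String × List Int) : String × Int :=
  (key_values.1, key_values.2.sum)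

def map_reduce (text : String) (search_words : Option (List String)) : List (String × Int) :=
  let text := removePunctuation text
  let words := PySem.Str.split₀ text
  -- 'if search_words:' — truthy: not None and not the empty list
  let words := match search_words with
    | some sw => if sw.isEmpty then words else words.filter (fun w => sw.contains w)
    | none => words
  let mapped_values := words.map mapFunction
  let shuffled_values := shuffleFunction mapped_values
  let reduced_values := shuffled_values.map reduceFunction
  (PySem.Dict.ofList reduced_values).items

-- ===== PORT B =====
def map_reduce_alt (text : String) (search_words : Option (List String)) : List (String × Int) :=
  let words := PySem.Str.split₀ (String.mk (text.toList.filter (fun c => !(pyPunctuation.contains c))))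
  let words := match search_words with
    | some sw => if sw.isEmpty then words else words.filter (fun w => sw.contains w)
    | none => words
  (PySem.Dict.counter (words.map PySem.Str.lower)).items

-- ===== PRECONDITION & SPEC =====
def Spec_map_reduce (text : String) (search_words : Option (List String)) (out : List (String × Int)) : Prop := out = map_reduce_alt text search_words
instance (text : String) (search_words : Option (List String)) (out : List (String × Int)) : Decidable (Spec_map_reduce text search_words out) := by unfold Spec_map_reduce; infer_instance

-- ===== CLAIM (what is proved, stated in full; the proofs are below) =====
def Claim_equal_map_reduce : Prop := ∀ (text : String) (search_words : Option (List String)), Dom_map_reduce text search_words → Spec_map_reduce text search_words (map_reduce text search_words)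

-- ===== LEMMAS AND PROOFS =====

-- A's pipeline applied to any word list produces exactly Counter(lowered words).items
theorem pipeline_eq_counter (ws : List String) :
    (PySem.Dict.ofList ((shuffleFunction (ws.map mapFunction)).map reduceFunction)).items
      = (PySem.Dict.counter (ws.map PySem.Str.lower)).items := by
  have hfst : (ws.map mapFunction).map Prod.fst = ws.map PySem.Str.lower := by
    simp [mapFunction]
  have hkeys :
      ((ws.map mapFunction).foldl (fun d p => d.modify p.1 [] (fun vs => vs ++ [p.2]))
        (PySem.Dict.empty : PySem.Dict String (List Int))).keys
        = PySem.Set.ofList (ws.map PySem.Str.lower) := by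
    rw [PySem.Dict.keys_foldl_modify_key (ws.map mapFunction) Prod.fst []
      (fun _ p => fun vs => vs ++ [p.2]) PySem.Dict.empty]
    rw [hfst]
    simp only [PySem.Dict.keys_empty]
    rw [PySem.Set.ofList_eq_foldl]
    rfl
  have hnd :
      ((ws.map mapFunction).foldl (fun d p => d.modify p.1 [] (fun vs => vs ++ [p.2]))
        (PySem.Dict.empty : PySem.Dict String (List Int))).keys.Nodup := by
    rw [hkeys]; exact PySem.Set.nodup_ofList _
  have hitems := PySem.Dict.items_eq_map_keys _ hnd ([] : List Int)
  rw [hkeys] at hitems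
  unfold shuffleFunction
  rw [hitems]
  have hred : ∀ k : String,
      reduceFunction (k, ((ws.map mapFunction).foldl
        (fun d p => d.modify p.1 [] (fun vs => vs ++ [p.2])) PySem.Dict.empty).getD k [])
      = (k, ((ws.map PySem.Str.lower).count k : Int)) := by
    intro k
    rw [show (((ws.map mapFunction).foldl
        (fun d p => d.modify p.1 [] (fun vs => vs ++ [p.2])) PySem.Dict.empty).getD k [])
        = ((PySem.Dict.empty : PySem.Dict String (List Int)).getD k [] ++
            (((ws.map mapFunction).filter (fun p => p.1 == k)).map (fun x => x.2)))
      from PySem.Dict.getD_foldl_modify_append (ws.map mapFunction) PySem.Dict.empty k]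
    unfold reduceFunction
    simp only [PySem.Dict.getD_empty, List.nil_append, List.filter_map, List.map_map]
    simp only [mapFunction, Function.comp_def]
    rw [PySem.List.sum_map_const_int]
    congr 1
    simp [List.count_eq_countP, List.countP_eq_length_filter, List.filter_map, Function.comp_def]
  rw [List.map_map]
  have hmap :
      (PySem.Set.ofList (ws.map PySem.Str.lower)).map
        (reduceFunction ∘ fun k => (k, ((ws.map mapFunction).foldl
          (fun d p => d.modify p.1 [] (fun vs => vs ++ [p.2])) PySem.Dict.empty).getD k []))
      = (PySem.Set.ofList (ws.map PySem.Str.lower)).map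
          (fun k => (k, ((ws.map PySem.Str.lower).count k : Int))) := by
    apply List.map_congr_left
    intro k _
    exact hred k
  rw [hmap, PySem.Dict.items_counter]
  have hconv : PySem.Dict.ofList ((PySem.Set.ofList (ws.map PySem.Str.lower)).map
        (fun k => (k, ((ws.map PySem.Str.lower).count k : Int))))
      = ((PySem.Set.ofList (ws.map PySem.Str.lower)).map
        (fun k => (k, ((ws.map PySem.Str.lower).count k : Int)))).foldl
          (fun d a => d.insert a.1 a.2) PySem.Dict.empty := rfl
  rw [hconv, PySem.Dict.items_foldl_insert_fresh _ Prod.fst Prod.snd PySem.Dict.empty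
    (by intro a _; exact PySem.Dict.contains_empty _)
    (by
      rw [List.map_map]
      have hid : (Prod.fst ∘ fun k : String => (k, ((ws.map PySem.Str.lower).count k : Int))) = id := rfl
      rw [hid, List.map_id]
      exact PySem.Set.nodup_ofList _)]
  rw [List.map_map]
  have h1 : ((fun a : String × Int => (a.1, a.2)) ∘ fun k : String =>
        (k, ((ws.map PySem.Str.lower).count k : Int)))
      = fun k : String => (k, ((ws.map PySem.Str.lower).count k : Int)) := rfl
  have h2 : (PySem.Dict.empty : PySem.Dict String Int).items = [] := rfl
  rw [h1, h2, List.nil_append]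

theorem map_reduce_eq (text : String) (search_words : Option (List String)) :
    map_reduce text search_words = map_reduce_alt text search_words := by
  unfold map_reduce map_reduce_alt removePunctuation
  cases search_words with
  | none => exact pipeline_eq_counter _
  | some sw =>
    by_cases h : sw.isEmpty <;> simp only [h, if_true] <;> exact pipeline_eq_counter _

-- ===== VERDICT (by name: the statement is the Claim_ definition above) =====
theorem map_reduce_spec : Claim_equal_map_reduce := by
  intro text search_words _
  unfold Spec_map_reduce
  exact map_reduce_eq text search_words
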